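-- pv_equiv track=rewrite | github.com/qualiaMachine/RunAI_apps | ocr_app/scripts/chunk_extract.py | chunk_page_ranges
-- ===== SOURCE A (Python) =====
-- def chunk_page_ranges(
--     total_pages: int,
--     max_pages_per_chunk: int,
--     overlap: int,
-- ) -> list[tuple[int, int]]:
--     """Plan overlapping chunks that cover [0, total_pages).
--
--     Returns a list of (start, end_exclusive) page indices. Each chunk has
--     length <= ``max_pages_per_chunk``; consecutive chunks share ``overlap``
--     pages. If the whole document fits in one chunk, returns a single
--     [0, total_pages) range.
--
--     Invariants:
--     - Every page index appears in at least one chunk.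
--     - Adjacent chunks share exactly ``overlap`` pages (except possibly the
--       last, which may have a larger overlap if the tail would otherwise
--       be shorter than a full chunk).
--     - No empty chunks.
--     """
--     if total_pages <= 0:
--         return []
--     if max_pages_per_chunk <= 0:
--         raise ValueError("max_pages_per_chunk must be positive")
--     if overlap < 0:
--         raise ValueError("overlap must be non-negative")
--     if overlap >= max_pages_per_chunk:
--         raise ValueError("overlap must be < max_pages_per_chunk")
--
--     if total_pages <= max_pages_per_chunk:
--         return [(0, total_pages)]
--
--     stride = max_pages_per_chunk - overlap
--     ranges: list[tuple[int, int]] = []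
--     start = 0
--     while start < total_pages:
--         end = min(start + max_pages_per_chunk, total_pages)
--         ranges.append((start, end))
--         if end == total_pages:
--             break
--         start += stride
--
--     # If the last two chunks have a large overlap (because the tail was
--     # short), back-merge them so we don't run a near-duplicate chunk.
--     if len(ranges) >= 2:
--         a_start, a_end = ranges[-2]
--         b_start, b_end = ranges[-1]
--         if b_end - a_start <= max_pages_per_chunk:
--             ranges[-2:] = [(a_start, b_end)]
--
--     return ranges
-- ===== SOURCE B (Python) =====
-- def chunk_page_ranges(
--     total_pages: int,
--     max_pages_per_chunk: int,
--     overlap: int,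
-- ) -> list[tuple[int, int]]:
--     """Plan overlapping chunks covering [0, total_pages), computed in closed form."""
--     if total_pages <= 0:
--         return []
--     if max_pages_per_chunk <= 0:
--         raise ValueError("max_pages_per_chunk must be positive")
--     if overlap < 0:
--         raise ValueError("overlap must be non-negative")
--     if overlap >= max_pages_per_chunk:
--         raise ValueError("overlap must be < max_pages_per_chunk")
--     if total_pages <= max_pages_per_chunk:
--         return [(0, total_pages)]
--     stride = max_pages_per_chunk - overlap
--     n = -(-(total_pages - max_pages_per_chunk) // stride) + 1
--     return [
--         (i * stride, min(i * stride + max_pages_per_chunk, total_pages))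
--         for i in range(n)
--     ]
-- ===== Notes on version B (the rewrite author's own statement) =====
-- stated objective: simpler
-- what changed: B computes the number of chunks in closed form (ceiling division) and builds the ranges by a comprehension, instead of discovering termination by stepping a start cursor with a break, and omits A's back-merge block, which is proved unreachable.
import Mathlib
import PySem

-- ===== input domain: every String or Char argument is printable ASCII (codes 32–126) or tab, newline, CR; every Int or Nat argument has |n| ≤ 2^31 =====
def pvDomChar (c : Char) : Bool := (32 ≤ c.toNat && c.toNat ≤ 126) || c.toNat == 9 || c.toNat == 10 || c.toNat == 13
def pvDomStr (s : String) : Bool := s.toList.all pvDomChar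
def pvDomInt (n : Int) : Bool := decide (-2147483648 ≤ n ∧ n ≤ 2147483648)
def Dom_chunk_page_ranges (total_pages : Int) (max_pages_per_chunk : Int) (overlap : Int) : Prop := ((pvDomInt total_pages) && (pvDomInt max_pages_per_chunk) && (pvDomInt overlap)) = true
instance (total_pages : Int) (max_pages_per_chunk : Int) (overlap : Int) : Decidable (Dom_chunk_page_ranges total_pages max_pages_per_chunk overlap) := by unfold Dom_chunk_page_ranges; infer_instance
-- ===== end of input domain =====

-- B replaces A's cursor loop (and dead back-merge) by a closed-form chunk count and a
-- range comprehension; objective: simpler. Where A raises ValueError, both ports return []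
-- (those inputs are outside Pre_).

-- ===== PORT A =====
-- fuel = total_pages.toNat makes the while-loop structural; it never runs out inside Pre_.
def chunkLoopA (total maxp stride : Int) : Nat → Int → List (Int × Int) → List (Int × Int)
  | 0, _, acc => acc
  | fuel + 1, start, acc =>
    if start < total then
      let e := min (start + maxp) total
      let acc' := acc ++ [(start, e)]
      if e = total then acc'
      else chunkLoopA total maxp stride fuel (start + stride) acc'
    else acc

def chunk_page_ranges (total_pages : Int) (max_pages_per_chunk : Int) (overlap : Int) : List (Int × Int) :=
  if total_pages ≤ 0 then []
  else if max_pages_per_chunk ≤ 0 then []        -- Python: raise ValueError (outside Pre_)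
  else if overlap < 0 then []                    -- Python: raise ValueError (outside Pre_)
  else if overlap ≥ max_pages_per_chunk then []  -- Python: raise ValueError (outside Pre_)
  else if total_pages ≤ max_pages_per_chunk then [(0, total_pages)]
  else
    let stride := max_pages_per_chunk - overlap
    let ranges := chunkLoopA total_pages max_pages_per_chunk stride total_pages.toNat 0 []
    if 2 ≤ ranges.length then
      match PySem.List.pyGet? ranges (-2), PySem.List.pyGet? ranges (-1) with
      | some (aS, _aE), some (_bS, bE) =>
        if bE - aS ≤ max_pages_per_chunk then ranges.take (ranges.length - 2) ++ [(aS, bE)]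
        else ranges
      | _, _ => ranges   -- unreachable: both indices are in range when 2 ≤ length
    else ranges

-- ===== PORT B =====
def chunk_page_ranges_alt (total_pages : Int) (max_pages_per_chunk : Int) (overlap : Int) : List (Int × Int) :=
  if total_pages ≤ 0 then []
  else if max_pages_per_chunk ≤ 0 then []        -- Python: raise ValueError (outside Pre_)
  else if overlap < 0 then []                    -- Python: raise ValueError (outside Pre_)
  else if overlap ≥ max_pages_per_chunk then []  -- Python: raise ValueError (outside Pre_)
  else if total_pages ≤ max_pages_per_chunk then [(0, total_pages)]
  else
    let stride := max_pages_per_chunk - overlap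
    let n := -(PySem.Int.floordiv (-(total_pages - max_pages_per_chunk)) stride) + 1
    (PySem.List.pyRange 0 n 1).map
      (fun i => (i * stride, min (i * stride + max_pages_per_chunk) total_pages))

-- ===== PRECONDITION & SPEC =====
-- Pre_ excludes exactly the inputs where Python A raises ValueError (invalid chunking
-- parameters with total_pages > 0); both Pythons raise identically there.
def Pre_chunk_page_ranges (total_pages : Int) (max_pages_per_chunk : Int) (overlap : Int) : Prop :=
  total_pages ≤ 0 ∨ (0 < max_pages_per_chunk ∧ 0 ≤ overlap ∧ overlap < max_pages_per_chunk)
instance (total_pages : Int) (max_pages_per_chunk : Int) (overlap : Int) : Decidable (Pre_chunk_page_ranges total_pages max_pages_per_chunk overlap) := by unfold Pre_chunk_page_ranges; infer_instance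

def pvWitness_chunk_page_ranges : Int × Int × Int := (10, 4, 1)

def Spec_chunk_page_ranges (total_pages : Int) (max_pages_per_chunk : Int) (overlap : Int) (out : List (Int × Int)) : Prop := out = chunk_page_ranges_alt total_pages max_pages_per_chunk overlap
instance (total_pages : Int) (max_pages_per_chunk : Int) (overlap : Int) (out : List (Int × Int)) : Decidable (Spec_chunk_page_ranges total_pages max_pages_per_chunk overlap out) := by unfold Spec_chunk_page_ranges; infer_instance

-- ===== CLAIM (what is proved, stated in full; the proofs are below) =====
def Claim_equal_chunk_page_ranges : Prop := ∀ (total_pages : Int) (max_pages_per_chunk : Int) (overlap : Int), Dom_chunk_page_ranges total_pages max_pages_per_chunk overlap → Pre_chunk_page_ranges total_pages max_pages_per_chunk overlap → Spec_chunk_page_ranges total_pages max_pages_per_chunk overlap (chunk_page_ranges total_pages max_pages_per_chunk overlap)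

-- ===== LEMMAS AND PROOFS =====

theorem pyGet?_penult {α : Type} (xs : List α) (a b : α) :
    PySem.List.pyGet? (xs ++ [a, b]) (-2) = some a := by
  rw [show (xs ++ [a, b]) = (xs ++ [a]) ++ [b] by simp,
      PySem.List.pyGet?_neg_ofNat _ 2 (by omega) (by simp)]
  simp

theorem pyGet?_last2 {α : Type} (xs : List α) (a b : α) :
    PySem.List.pyGet? (xs ++ [a, b]) (-1) = some b := by
  rw [show (xs ++ [a, b]) = (xs ++ [a]) ++ [b] by simp]
  exact PySem.List.pyGet?_neg_one_append_singleton _ _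

-- Loop characterisation: starting at i*s, the cursor loop appends exactly the chunks
-- i, i+1, …, c of B's closed-form list (c = index of last chunk).
theorem loopA_eq (t m s : Int) (hs : 1 ≤ s) (hsm : s ≤ m) (c : Int)
    (hc1 : (c - 1) * s < t - m) (hc2 : t - m ≤ c * s) :
    ∀ (fuel : Nat) (i : Int) (acc : List (Int × Int)), 0 ≤ i → i ≤ c →
      t - i * s ≤ (fuel : Int) →
      chunkLoopA t m s fuel (i * s) acc =
        acc ++ (PySem.List.pyRange i (c + 1) 1).map
          (fun j => (j * s, min (j * s + m) t)) := by
  intro fuel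
  induction fuel with
  | zero =>
    intro i acc h0 hic hfuel
    exfalso
    have hcs : c * s < t := by nlinarith
    have : i * s ≤ c * s := by nlinarith
    simp at hfuel; omega
  | succ fuel ih =>
    intro i acc h0 hic hfuel
    have hcs : c * s < t := by nlinarith
    have his : i * s ≤ c * s := by nlinarith
    have hlt : i * s < t := by omega
    by_cases hlast : i = c
    · subst hlast
      have hmin : min (i * s + m) t = t := by omega
      simp only [chunkLoopA, if_pos hlt, hmin]
      rw [show i + 1 = i + 1 by rfl, PySem.List.pyRange_one_cons (by omega),
          PySem.List.pyRange_one_eq_nil (by omega)]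
      simp [hmin]
    · have hic' : i < c := lt_of_le_of_ne hic hlast
      have hstep : i * s + m < t := by nlinarith
      have hmin : min (i * s + m) t = i * s + m := by omega
      simp only [chunkLoopA, if_pos hlt, hmin, if_neg (by omega : ¬ (i * s + m = t))]
      have harg : i * s + s = (i + 1) * s := by ring
      rw [harg, ih (i + 1) _ (by omega) (by omega) (by push_cast at hfuel ⊢; nlinarith)]
      rw [PySem.List.pyRange_one_cons (by omega : i < c + 1)]
      simp [hmin]

theorem ceil_bounds (a b : Int) (hb : 0 < b) :
    (-(PySem.Int.floordiv (-a) b) - 1) * b < a ∧ a ≤ -(PySem.Int.floordiv (-a) b) * b := by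
  have h := (PySem.Int.neg_floordiv_neg_eq_iff_of_pos (a := a) (b := b)
      (q := -(PySem.Int.floordiv (-a) b)) hb).mp rfl
  exact ⟨h.1, h.2⟩

-- ===== VERDICT (by name: the statement is the Claim_ definition above) =====
theorem chunk_page_ranges_spec : Claim_equal_chunk_page_ranges := by
  intro t m ov _hD hPre
  unfold Spec_chunk_page_ranges chunk_page_ranges chunk_page_ranges_alt
  by_cases h0 : t ≤ 0
  · simp [h0]
  rcases hPre with h | ⟨hm, hov0, hovm⟩
  · omega
  rw [if_neg h0, if_neg (by omega : ¬ m ≤ 0), if_neg (by omega : ¬ ov < 0),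
      if_neg (by omega : ¬ ov ≥ m),
      if_neg h0, if_neg (by omega : ¬ m ≤ 0), if_neg (by omega : ¬ ov < 0),
      if_neg (by omega : ¬ ov ≥ m)]
  by_cases hfit : t ≤ m
  · simp [hfit]
  rw [if_neg hfit, if_neg hfit]
  set s := m - ov with hsdef
  have hs : 1 ≤ s := by omega
  have hsm : s ≤ m := by omega
  set c : Int := -(PySem.Int.floordiv (-(t - m)) s) with hcdef
  obtain ⟨hc1, hc2⟩ := ceil_bounds (t - m) s (by omega)
  rw [← hcdef] at hc1 hc2
  have hc1' : (c - 1) * s < t - m := by nlinarith [hc1]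
  have hcpos : 1 ≤ c := by nlinarith
  -- the loop computes B's list
  have hloop : chunkLoopA t m s t.toNat 0 [] =
      (PySem.List.pyRange 0 (c + 1) 1).map (fun j => (j * s, min (j * s + m) t)) := by
    have := loopA_eq t m s hs hsm c hc1' hc2 t.toNat 0 [] le_rfl (by omega)
      (by omega)
    simpa using this
  simp only [hloop]
  -- the back-merge block is a no-op: split the list as … ++ [chunk (c-1), chunk c]
  set f : Int → Int × Int := fun j => (j * s, min (j * s + m) t) with hfdef
  have hsplit : PySem.List.pyRange 0 (c + 1) 1 =
      PySem.List.pyRange 0 (c - 1) 1 ++ [c - 1, c] := by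
    rw [show c + 1 = c + 1 by rfl, PySem.List.pyRange_one_succ_right (by omega),
        show c = (c - 1) + 1 by ring, PySem.List.pyRange_one_succ_right (by omega)]
    simp
  have hmap : (PySem.List.pyRange 0 (c + 1) 1).map f =
      (PySem.List.pyRange 0 (c - 1) 1).map f ++ [f (c - 1), f c] := by
    rw [hsplit]; simp
  rw [show -PySem.Int.floordiv (-(t - m)) s + 1 = c + 1 from by rw [hcdef]]
  rw [hmap, if_pos (by simp), pyGet?_penult, pyGet?_last2]
  have hfc1 : f (c - 1) = ((c - 1) * s, (c - 1) * s + m) := by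
    simp only [hfdef]
    congr 1
    omega
  have hfc : (f c).2 = t := by
    simp only [hfdef]
    have : c * s + m ≥ t := by omega
    omega
  rw [hfc1]
  simp only [hfc]
  rw [if_neg (by omega : ¬ t - (c - 1) * s ≤ m)]
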